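-- pv_equiv track=rewrite | github.com/MrBrantCode/unitest_baseline | mut_generate/mist_train_taco/taco_9165/solution.py | toggle_bits
-- ===== SOURCE A (Python) =====
-- def toggle_bits(N: int, L: int, R: int) -> int:
--     # Convert N to its binary representation as a string
--     binary_str = bin(N)[2:]
--
--     # Convert the binary string to a list of characters for easy manipulation
--     binary_list = list(binary_str)
--
--     # Calculate the starting and ending indices for the range to toggle
--     start_index = len(binary_list) - L
--     end_index = len(binary_list) - R
--
--     # Toggle the bits in the specified range
--     for i in range(start_index, end_index + 1):
--         if binary_list[i] == '1':
--             binary_list[i] = '0'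
--         else:
--             binary_list[i] = '1'
--
--     # Join the list back into a string and convert it to an integer
--     toggled_binary_str = ''.join(binary_list)
--     result = int(toggled_binary_str, 2)
--
--     return result
-- ===== SOURCE B (Python) =====
-- def toggle_bits(N, L, R):
--     if L < R:
--         return N
--     mask = ((1 << (L - R + 1)) - 1) << (R - 1)
--     return N ^ mask
-- ===== Notes on version B (the rewrite author's own statement) =====
-- stated objective: idiomatic
-- what changed: Replaces the bin()/list()/int() string round-trip and the per-character toggle loop by a single integer XOR with a mask covering bit positions R-1..L-1 (empty range returns N unchanged).
-- intended difference: When 1 <= R <= L and L exceeds N's binary length (up to twice it), A's negative start index wraps around and it toggles interior characters of the binary string, returning a value below 2^bit_length(N); B toggles the true bit positions R-1..L-1, which is the intended range toggle (e.g. N=0,L=2,R=1: A returns 0, B returns 3). — e.g. on toggle_bits(0, 2, 1): A returns 0, B returns 3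
-- outside the precondition, e.g. on toggle_bits(-5, 4, 4): A returns 13, B returns -13; on toggle_bits(-5, 6, 1): A returns 9, B returns -60
import Mathlib
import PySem

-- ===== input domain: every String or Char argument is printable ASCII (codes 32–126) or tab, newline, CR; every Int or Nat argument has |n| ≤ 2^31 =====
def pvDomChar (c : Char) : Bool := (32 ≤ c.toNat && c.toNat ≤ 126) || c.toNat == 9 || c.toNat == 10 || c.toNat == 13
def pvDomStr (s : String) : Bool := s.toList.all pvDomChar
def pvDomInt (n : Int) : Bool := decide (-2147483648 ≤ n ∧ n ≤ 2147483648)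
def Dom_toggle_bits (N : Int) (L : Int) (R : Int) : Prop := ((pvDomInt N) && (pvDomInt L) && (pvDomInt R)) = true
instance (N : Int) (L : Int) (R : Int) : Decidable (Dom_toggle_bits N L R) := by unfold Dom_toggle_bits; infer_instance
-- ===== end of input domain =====

-- B replaces A's bin()/list()/int() string round-trip and per-character loop by one
-- integer XOR with a mask over bit positions R-1..L-1 (idiomatic; no string handling).


-- ===== PORT A =====
-- the loop body: if binary_list[i] == '1': binary_list[i] = '0' else: binary_list[i] = '1'
def pvFlipStep (bl : List Char) (i : Int) : List Char :=
  if PySem.List.pyGetD bl i ' ' = '1' then PySem.List.pySetD bl i '0' else PySem.List.pySetD bl i '1'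

-- int(s, 2) ported by hand as the base-2 digit fold; exact for every nonempty string of
-- '0'/'1' digits, which is what this program feeds it on every input admitted by Pre_.
def pvParseBin (cs : List Char) : Nat := cs.foldl (fun a c => 2 * a + (if c = '1' then 1 else 0)) 0

def toggle_bits (N : Int) (L : Int) (R : Int) : Int :=
  let binaryList := PySem.List.slice (PySem.Int.toBinChars0b N) (some 2) none   -- list(bin(N)[2:])
  let startIndex : Int := PySem.List.len binaryList - L
  let endIndex : Int := PySem.List.len binaryList - R
  let toggled := (PySem.List.pyRange startIndex (endIndex + 1) 1).foldl pvFlipStep binaryList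
  ((pvParseBin toggled : Nat) : Int)

-- ===== PORT B =====
def toggle_bits_alt (N : Int) (L : Int) (R : Int) : Int :=
  if L < R then N
  else PySem.Int.bxor N (((1 <<< (L - R + 1).toNat) - 1) <<< (R - 1).toNat)

-- ===== PRECONDITION & SPEC =====
-- length of bin(N)[2:] for N ≥ 0
def pvSlen (N : Int) : Nat := if N = 0 then 1 else PySem.Int.bitLength N

-- Pre_ excludes the inputs on which A raises (IndexError when the toggle range leaves the
-- wrapped digit string, i.e. R ≤ 0 or L more than twice the binary length, ValueError from
-- the 'b' of bin(N) on negative N) and all negative N, where a value A does return is an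
-- accident of toggling characters of bin(N)'s sign/'0b' prefix.
def Pre_toggle_bits (N : Int) (L : Int) (R : Int) : Prop :=
  0 ≤ N ∧ (L < R ∨ (1 ≤ R ∧ L ≤ 2 * (pvSlen N : Int)))
instance (N : Int) (L : Int) (R : Int) : Decidable (Pre_toggle_bits N L R) := by
  unfold Pre_toggle_bits; infer_instance
def pvWitness_toggle_bits : Int × Int × Int := (5, 2, 1)

-- When 1 ≤ R ≤ L and L exceeds N's binary length (up to twice it), A's negative start index
-- wraps around and toggles interior characters of the binary string, returning a value below
-- 2^bit_length(N); B toggles the true bit positions R-1..L-1, the intended range toggle.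
def D_toggle_bits (N : Int) (L : Int) (R : Int) : Prop :=
  0 ≤ N ∧ 1 ≤ R ∧ R ≤ L ∧ (pvSlen N : Int) < L ∧ L ≤ 2 * (pvSlen N : Int)
instance (N : Int) (L : Int) (R : Int) : Decidable (D_toggle_bits N L R) := by
  unfold D_toggle_bits; infer_instance

def Spec_toggle_bits (N : Int) (L : Int) (R : Int) (out : Int) : Prop :=
  ¬ D_toggle_bits N L R → out = toggle_bits_alt N L R
instance (N : Int) (L : Int) (R : Int) (out : Int) : Decidable (Spec_toggle_bits N L R out) := by
  unfold Spec_toggle_bits; infer_instance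

def pvDiffWitness_toggle_bits : Int × Int × Int := (0, 2, 1)
def pvDiffWitnessOut_toggle_bits : Int × Int := (0, 3)

-- ===== CLAIM (what is proved, stated in full; the proofs are below) =====
def Claim_unchanged_toggle_bits : Prop := ∀ (N : Int) (L : Int) (R : Int), Dom_toggle_bits N L R → Pre_toggle_bits N L R → Spec_toggle_bits N L R (toggle_bits N L R)
def Claim_changed_toggle_bits : Prop := Dom_toggle_bits (pvDiffWitness_toggle_bits.1) (pvDiffWitness_toggle_bits.2.1) (pvDiffWitness_toggle_bits.2.2) ∧ Pre_toggle_bits (pvDiffWitness_toggle_bits.1) (pvDiffWitness_toggle_bits.2.1) (pvDiffWitness_toggle_bits.2.2) ∧ D_toggle_bits (pvDiffWitness_toggle_bits.1) (pvDiffWitness_toggle_bits.2.1) (pvDiffWitness_toggle_bits.2.2) ∧ toggle_bits (pvDiffWitness_toggle_bits.1) (pvDiffWitness_toggle_bits.2.1) (pvDiffWitness_toggle_bits.2.2) = pvDiffWitnessOut_toggle_bits.1 ∧ toggle_bits_alt (pvDiffWitness_toggle_bits.1) (pvDiffWitness_toggle_bits.2.1) (pvDiffWitness_toggle_bits.2.2)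 = pvDiffWitnessOut_toggle_bits.2 ∧ pvDiffWitnessOut_toggle_bits.1 ≠ pvDiffWitnessOut_toggle_bits.2
def Claim_exact_toggle_bits : Prop := ∀ (N : Int) (L : Int) (R : Int), Dom_toggle_bits N L R → Pre_toggle_bits N L R → D_toggle_bits N L R → toggle_bits N L R ≠ toggle_bits_alt N L R

-- ===== LEMMAS AND PROOFS =====

-- the binary digit characters of n, most significant first ([] for n = 0)
def pvBits : Nat → List Char
  | 0 => []
  | (n + 1) => pvBits ((n + 1) / 2) ++ [if (n + 1) % 2 = 1 then '1' else '0']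
decreasing_by omega

-- the exact character list bin(n)[2:] produces
def pvCanon (n : Nat) : List Char := if n = 0 then ['0'] else pvBits n

def pvAllBin (cs : List Char) : Prop := ∀ c ∈ cs, c = '0' ∨ c = '1'

lemma pvBits_pos (n : Nat) (h : 0 < n) :
    pvBits n = pvBits (n / 2) ++ [if n % 2 = 1 then '1' else '0'] := by
  cases n with
  | zero => omega
  | succ m => rw [pvBits]

lemma pvToDigitsCore_eq (f : Nat) : ∀ (n : Nat) (acc : List Char), 0 < n → n < 2 ^ f →
    Nat.toDigitsCore 2 f n acc = pvBits n ++ acc := by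
  induction f with
  | zero => intro n acc h1 h2; simp at h2; omega
  | succ f ih =>
    intro n acc h1 h2
    rw [Nat.toDigitsCore]
    have hd : (n % 2).digitChar = if n % 2 = 1 then '1' else '0' := by
      rcases Nat.mod_two_eq_zero_or_one n with h | h <;> rw [h] <;> rfl
    by_cases h : n / 2 = 0
    · have hn : n = 1 := by omega
      subst hn
      simp [pvBits_pos 1 (by omega), pvBits]
      decide
    · rw [if_neg h]
      rw [ih (n / 2) _ (by omega) (by
        have hp2 : 2 ^ (f + 1) = 2 ^ f * 2 := pow_succ 2 f
        omega)]
      rw [pvBits_pos n h1, hd, List.append_assoc]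
      rfl

lemma pvToDigits_two (n : Nat) : Nat.toDigits 2 n = pvCanon n := by
  rcases Nat.eq_zero_or_pos n with h | h
  · subst h; rfl
  · unfold Nat.toDigits
    rw [pvToDigitsCore_eq (n + 1) n [] h
      (lt_of_lt_of_le (Nat.lt_two_pow_self) (Nat.pow_le_pow_right (by omega) (by omega)))]
    simp [pvCanon, Nat.pos_iff_ne_zero.mp h]

lemma pvBits_len (n : Nat) : (pvBits n).length = PySem.Int.bitLength (n : Int) := by
  induction n using Nat.strong_induction_on with
  | _ n ih =>
    rcases Nat.eq_zero_or_pos n with h | h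
    · subst h; simp [pvBits, PySem.Int.bitLength_zero]
    · rw [pvBits_pos n h]
      rw [PySem.Int.bitLength_natCast h]
      simp [ih (n / 2) (by omega)]

lemma pvCanon_len (n : Nat) : (pvCanon n).length = pvSlen (n : Int) := by
  unfold pvCanon pvSlen
  rcases Nat.eq_zero_or_pos n with h | h
  · subst h; simp
  · rw [if_neg (by omega), if_neg (by exact_mod_cast (by omega : ¬ n = 0))]
    exact pvBits_len n

lemma pvBits_allbin (n : Nat) : pvAllBin (pvBits n) := by
  induction n using Nat.strong_induction_on with
  | _ n ih =>
    rcases Nat.eq_zero_or_pos n with h | h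
    · subst h; intro c hc; simp [pvBits] at hc
    · rw [pvBits_pos n h]
      intro c hc
      rcases List.mem_append.mp hc with h' | h'
      · exact ih (n / 2) (by omega) c h'
      · simp at h'
        subst h'
        split <;> simp

lemma pvCanon_allbin (n : Nat) : pvAllBin (pvCanon n) := by
  unfold pvCanon
  split
  · intro c hc; simp at hc; subst hc; simp
  · exact pvBits_allbin n

lemma pvParse_append (xs : List Char) (c : Char) :
    pvParseBin (xs ++ [c]) = 2 * pvParseBin xs + (if c = '1' then 1 else 0) := by
  simp [pvParseBin, List.foldl_append]

lemma pvBits_roundtrip (n : Nat) : pvParseBin (pvBits n) = n := by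
  induction n using Nat.strong_induction_on with
  | _ n ih =>
    rcases Nat.eq_zero_or_pos n with h | h
    · subst h; simp [pvBits, pvParseBin]
    · rw [pvBits_pos n h, pvParse_append, ih (n / 2) (by omega)]
      rcases Nat.mod_two_eq_zero_or_one n with h' | h' <;> rw [h'] <;> simp <;> omega

lemma pvCanon_roundtrip (n : Nat) : pvParseBin (pvCanon n) = n := by
  unfold pvCanon
  split
  · subst ‹n = 0›; rfl
  · exact pvBits_roundtrip n

lemma pvParse_lt (cs : List Char) : pvParseBin cs < 2 ^ cs.length := by
  induction cs using List.reverseRecOn with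
  | nil => simp [pvParseBin]
  | append_singleton xs c ih =>
    rw [pvParse_append]
    simp only [List.length_append, List.length_singleton, pow_succ]
    have : (if c = '1' then 1 else 0) ≤ 1 := by split <;> omega
    omega

lemma pvParse_testBit (cs : List Char) (hA : pvAllBin cs) :
    ∀ (p : Nat) (hp : p < cs.length),
      (pvParseBin cs).testBit p = decide (cs[cs.length - 1 - p]'(by omega) = '1') := by
  induction cs using List.reverseRecOn with
  | nil => intro p hp; simp at hp
  | append_singleton xs c ih =>
    intro p hp
    have hb : (if c = '1' then 1 else 0) ≤ 1 := by split <;> omega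
    have hlen : (xs ++ [c]).length = xs.length + 1 := by simp
    rw [pvParse_append]
    cases p with
    | zero =>
      rw [Nat.testBit_zero]
      have hidx : (xs ++ [c]).length - 1 - 0 = xs.length := by simp
      have hget : (xs ++ [c])[(xs ++ [c]).length - 1 - 0]'(by omega) = c := by
        simp [List.getElem_append_right]
      rw [hget]
      by_cases hc : c = '1'
      · simp only [hc]
        have : (2 * pvParseBin xs + 1) % 2 = 1 := by omega
        simp [this]
      · simp only [if_neg hc]
        have : ¬ (2 * pvParseBin xs + 0) % 2 = 1 := by omega
        simp [hc]
    | succ p =>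
      rw [Nat.testBit_succ]
      have hdiv : (2 * pvParseBin xs + (if c = '1' then 1 else 0)) / 2 = pvParseBin xs := by
        split <;> omega
      rw [hdiv]
      have hp' : p < xs.length := by
        rw [hlen] at hp; omega
      rw [ih (fun x hx => hA x (List.mem_append_left _ hx)) p hp']
      have hidx : (xs ++ [c]).length - 1 - (p + 1) = xs.length - 1 - p := by
        rw [hlen]; omega
      have hget : (xs ++ [c])[(xs ++ [c]).length - 1 - (p + 1)]'(by omega) =
          xs[xs.length - 1 - p]'(by omega) := by
        simp only [hidx]
        exact List.getElem_append_left (by omega)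
      rw [hget]

lemma pvParse_testBitD (cs : List Char) (hA : pvAllBin cs) (p : Nat) (hp : p < cs.length)
    (q : Nat) (hq : q = cs.length - 1 - p) (h : q < cs.length) :
    (pvParseBin cs).testBit p = decide (cs.getD q ' ' = '1') := by
  subst hq
  rw [List.getD_eq_getElem cs ' ' h]
  exact pvParse_testBit cs hA p hp

lemma pvGetD_set (l : List Char) (i j : Nat) (v : Char)
    (hj : j < l.length) : (l.set i v).getD j ' ' = if i = j then v else l.getD j ' ' := by
  rw [List.getD_eq_getElem _ ' ' (by simpa using hj), List.getD_eq_getElem l ' ' hj]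
  rw [List.getElem_set]

lemma pvFold_len (r : List Int) (cs : List Char) :
    (r.foldl pvFlipStep cs).length = cs.length := by
  induction r generalizing cs with
  | nil => rfl
  | cons i r ih =>
    simp only [List.foldl_cons, ih]
    unfold pvFlipStep
    split <;> exact PySem.List.length_pySetD ..

lemma pvMem_pySetD {xs : List Char} {i : Int} {v c : Char}
    (h : c ∈ PySem.List.pySetD xs i v) : c ∈ xs ∨ c = v := by
  unfold PySem.List.pySetD PySem.List.pySet? at h
  cases hk : PySem.List.pyIdx? xs.length i with
  | none => rw [hk] at h; simp at h; exact Or.inl h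
  | some k => rw [hk] at h; simp at h; exact List.mem_or_eq_of_mem_set h

lemma pvFold_allbin (r : List Int) (cs : List Char) (h : pvAllBin cs) :
    pvAllBin (r.foldl pvFlipStep cs) := by
  induction r generalizing cs with
  | nil => exact h
  | cons i r ih =>
    refine ih _ ?_
    intro c hc
    unfold pvFlipStep at hc
    split at hc <;> rcases pvMem_pySetD hc with h' | h' <;> first
      | exact h c h' | exact Or.inl h' | exact Or.inr h'

lemma pvFold_char (k : Nat) : ∀ (a b : Int) (cs : List Char), (b - a).toNat = k →
    0 ≤ a → b ≤ (cs.length : Int) →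
    ∀ (j : Nat), j < cs.length →
      ((PySem.List.pyRange a b 1).foldl pvFlipStep cs).getD j ' ' =
        (if a ≤ (j : Int) ∧ (j : Int) < b then
          (if cs.getD j ' ' = '1' then '0' else '1') else cs.getD j ' ') := by
  induction k with
  | zero =>
    intro a b cs hk h0 hb j hj
    rw [PySem.List.pyRange_one_eq_nil (by omega)]
    simp only [List.foldl_nil]
    rw [if_neg (by omega)]
  | succ k ih =>
    intro a b cs hk h0 hb j hj
    have hab : a < b := by omega
    have haN : a.toNat < cs.length := by omega
    rw [PySem.List.pyRange_one_cons hab]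
    simp only [List.foldl_cons]
    have hstep : pvFlipStep cs a = cs.set a.toNat (if cs[a.toNat] = '1' then '0' else '1') := by
      unfold pvFlipStep
      rw [PySem.List.pyGetD_eq_getElem cs ' ' h0 (by omega)]
      split <;> rw [PySem.List.pySetD_of_nonneg _ _ h0]
    rw [hstep]
    rw [ih (a + 1) b (cs.set a.toNat (if cs[a.toNat] = '1' then '0' else '1'))
      (by omega) (by omega) (by simpa using hb) j (by simpa using hj)]
    rw [pvGetD_set cs a.toNat j _ hj]
    by_cases hj_a : j = a.toNat
    · subst hj_a
      rw [List.getD_eq_getElem cs ' ' hj]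
      rw [if_neg (show ¬(a + 1 ≤ ((a.toNat : Nat) : Int) ∧ ((a.toNat : Nat) : Int) < b) from
        by omega)]
      rw [if_pos (rfl : a.toNat = a.toNat)]
      rw [if_pos (show a ≤ ((a.toNat : Nat) : Int) ∧ ((a.toNat : Nat) : Int) < b from by omega)]
    · rw [if_neg (show ¬ a.toNat = j from fun he => hj_a he.symm)]
      by_cases hin : a + 1 ≤ (j : Int) ∧ (j : Int) < b
      · rw [if_pos hin, if_pos (show a ≤ (j : Int) ∧ (j : Int) < b from by omega)]
      · rw [if_neg hin, if_neg (show ¬(a ≤ (j : Int) ∧ (j : Int) < b) from by omega)]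

-- the toggled range parses to (parse cs) XOR mask, for an in-bounds range
lemma pvKey (cs : List Char) (hA : pvAllBin cs) (L R : Int)
    (h1 : 1 ≤ R) (h2 : R ≤ L) (h3 : L ≤ (cs.length : Int)) :
    pvParseBin ((PySem.List.pyRange ((cs.length : Int) - L) ((cs.length : Int) - R + 1) 1).foldl
        pvFlipStep cs) =
      pvParseBin cs ^^^ ((2 ^ (L - R + 1).toNat - 1) <<< (R - 1).toNat) := by
  set s : Nat := (R - 1).toNat with hs
  set w : Nat := (L - R + 1).toNat with hw
  have hTlen : ((PySem.List.pyRange ((cs.length : Int) - L) ((cs.length : Int) - R + 1) 1).foldl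
      pvFlipStep cs).length = cs.length := pvFold_len ..
  have hTA : pvAllBin ((PySem.List.pyRange ((cs.length : Int) - L) ((cs.length : Int) - R + 1) 1).foldl
      pvFlipStep cs) := pvFold_allbin _ _ hA
  apply Nat.eq_of_testBit_eq
  intro p
  rw [Nat.testBit_xor, Nat.testBit_shiftLeft, Nat.testBit_two_pow_sub_one]
  by_cases hp : p < cs.length
  · have hj : cs.length - 1 - p < cs.length := by omega
    rw [pvParse_testBitD _ hTA p (by omega) (cs.length - 1 - p) (by omega) (by omega)]
    rw [pvParse_testBitD cs hA p hp (cs.length - 1 - p) rfl hj]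
    rw [pvFold_char (((cs.length : Int) - R + 1) - ((cs.length : Int) - L)).toNat
      ((cs.length : Int) - L) ((cs.length : Int) - R + 1) cs rfl (by omega) (by omega) _ hj]
    rw [List.getD_eq_getElem cs ' ' hj]
    by_cases hin : s ≤ p ∧ p - s < w
    · rw [if_pos (by omega)]
      rcases hA _ (cs.getElem_mem hj) with h0c | h1c
      · rw [h0c]
        simp [hin.1, hin.2]
      · rw [h1c]
        simp [hin.1, hin.2]
    · rw [if_neg (by omega)]
      have hfalse : (decide (p ≥ s) && decide (p - s < w)) = false := by
        by_cases h1 : s ≤ p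
        · have h2 : ¬ p - s < w := fun h2 => hin ⟨h1, h2⟩
          simp [h2]
        · simp [h1]
      rw [hfalse, Bool.xor_false]
  · have hsw : s + w = L.toNat := by omega
    have hTfalse : (pvParseBin ((PySem.List.pyRange ((cs.length : Int) - L)
        ((cs.length : Int) - R + 1) 1).foldl pvFlipStep cs)).testBit p = false :=
      Nat.testBit_lt_two_pow (lt_of_lt_of_le (pvParse_lt _)
        (by rw [hTlen]; exact Nat.pow_le_pow_right (by omega) (by omega)))
    have hcfalse : (pvParseBin cs).testBit p = false :=
      Nat.testBit_lt_two_pow (lt_of_lt_of_le (pvParse_lt cs)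
        (Nat.pow_le_pow_right (by omega) (by omega)))
    rw [hTfalse, hcfalse]
    have hns : ¬ p - s < w := by omega
    simp [hns]

lemma pvBinaryList_eq (N : Int) (h : 0 ≤ N) :
    PySem.List.slice (PySem.Int.toBinChars0b N) (some 2) none = pvCanon N.toNat := by
  unfold PySem.Int.toBinChars0b
  rw [if_neg (by omega)]
  rw [PySem.List.slice_from _ (by omega : (0 : Int) ≤ 2)]
  show List.drop 2 ('0' :: 'b' :: Nat.toDigits 2 N.toNat) = pvCanon N.toNat
  rw [List.drop_succ_cons, List.drop_succ_cons, List.drop_zero]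
  exact pvToDigits_two N.toNat

lemma pvMask_eq (L R : Int) :
    (((1 <<< (L - R + 1).toNat) - 1) <<< (R - 1).toNat : Nat) =
      (2 ^ (L - R + 1).toNat - 1) <<< (R - 1).toNat := by
  rw [Nat.shiftLeft_eq 1, one_mul]

-- ===== VERDICT (by name: the statement is the Claim_ definition above) =====
lemma pvAltValue (N L R : Int) (hN : 0 ≤ N) (hLR : ¬ L < R) :
    toggle_bits_alt N L R =
      ((N.toNat ^^^ ((2 ^ (L - R + 1).toNat - 1) <<< (R - 1).toNat) : Nat) : Int) := by
  unfold toggle_bits_alt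
  rw [if_neg hLR, PySem.Int.bxor_of_nonneg hN (Int.natCast_nonneg _), Int.toNat_natCast,
    pvMask_eq]

lemma pvN_lt (N : Int) (hN : 0 ≤ N) : N.toNat < 2 ^ pvSlen N := by
  unfold pvSlen
  by_cases h : N = 0
  · subst h; simp
  · rw [if_neg h]
    have := PySem.Int.lt_two_pow_bitLength N
    omega

-- ===== VERDICT (by name: the statement is the Claim_ definition above) =====
theorem toggle_bits_spec : Claim_unchanged_toggle_bits := by
  intro N L R hDom hPre hND
  obtain ⟨hN, hPre2⟩ := hPre
  have hNn : N = (N.toNat : Int) := by omega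
  simp only [toggle_bits]
  rw [pvBinaryList_eq N hN]
  simp only [PySem.List.len_eq]
  have hcslen : ((pvCanon N.toNat).length : Int) = (pvSlen N : Int) := by
    rw [pvCanon_len]
    exact_mod_cast congrArg (fun x => ((pvSlen x : Nat) : Int)) hNn.symm
  by_cases hLR : L < R
  · rw [PySem.List.pyRange_one_eq_nil (by omega)]
    simp only [List.foldl_nil]
    rw [pvCanon_roundtrip]
    unfold toggle_bits_alt
    rw [if_pos hLR]
    omega
  · have hR1 : 1 ≤ R := (hPre2.resolve_left hLR).1
    have hL2 : L ≤ 2 * (pvSlen N : Int) := (hPre2.resolve_left hLR).2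
    have hRL : R ≤ L := by omega
    have hLslen : L ≤ (pvSlen N : Int) := by
      by_contra h
      exact hND ⟨hN, hR1, hRL, by omega, hL2⟩
    rw [pvKey (pvCanon N.toNat) (pvCanon_allbin N.toNat) L R hR1 hRL (by omega)]
    rw [pvCanon_roundtrip, pvAltValue N L R hN hLR]

theorem toggle_bits_changed : Claim_changed_toggle_bits := by
  unfold Claim_changed_toggle_bits; decide

theorem toggle_bits_tight : Claim_exact_toggle_bits := by
  intro N L R hDom hPre hD
  obtain ⟨hN, hR1, hRL, hSL, hL2⟩ := hD
  have hLR : ¬ L < R := by omega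
  simp only [toggle_bits]
  rw [pvBinaryList_eq N hN]
  simp only [PySem.List.len_eq]
  rw [pvAltValue N L R hN hLR]
  have hcslen : ((pvCanon N.toNat).length : Int) = (pvSlen N : Int) := by
    rw [pvCanon_len]
    exact_mod_cast congrArg (fun x => ((pvSlen x : Nat) : Int)) (by omega : N = (N.toNat : Int)).symm
  set s : Nat := (R - 1).toNat with hs
  set w : Nat := (L - R + 1).toNat with hw
  set m : Nat := (2 ^ w - 1) <<< s with hm
  set T := (PySem.List.pyRange (((pvCanon N.toNat).length : Int) - L)
      (((pvCanon N.toNat).length : Int) - R + 1) 1).foldl pvFlipStep (pvCanon N.toNat) with hT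
  have hTlt : pvParseBin T < 2 ^ (pvCanon N.toNat).length := by
    have := pvParse_lt T
    rwa [hT, pvFold_len] at this
  have hbit : (N.toNat ^^^ m).testBit (L - 1).toNat = true := by
    rw [Nat.testBit_xor]
    have hn : N.toNat.testBit (L - 1).toNat = false :=
      Nat.testBit_lt_two_pow (lt_of_lt_of_le (pvN_lt N hN)
        (Nat.pow_le_pow_right (by omega) (by omega)))
    rw [hn, hm, Nat.testBit_shiftLeft, Nat.testBit_two_pow_sub_one, Bool.false_xor]
    simp only [ge_iff_le, Bool.and_eq_true, decide_eq_true_eq]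
    omega
  have hge : 2 ^ (L - 1).toNat ≤ N.toNat ^^^ m := Nat.ge_two_pow_of_testBit hbit
  have hpow : 2 ^ (pvCanon N.toNat).length ≤ 2 ^ (L - 1).toNat :=
    Nat.pow_le_pow_right (by omega) (by omega)
  exact fun heq =>
    Nat.ne_of_lt (lt_of_lt_of_le hTlt (le_trans hpow hge)) (Int.natCast_inj.mp heq)
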